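-- pv_equiv track=rewrite | github.com/pypi-data/pypi-mirror-382 | packages/borgitory/borgitory-2.5.4.tar.gz/borgitory-2.5.4/src/borgitory/services/jobs/job_executor.py | format_command_for_logging
-- ===== SOURCE A (Python) =====
-- from typing import Dict, List, Optional, Callable, TYPE_CHECKING, cast
--
-- def format_command_for_logging(command: List[str]) -> str:
--     """Format command for safe logging (hide sensitive info)"""
--     safe_command = []
--     skip_next = False
--
--     for i, arg in enumerate(command):
--         if skip_next:
--             safe_command.append("[REDACTED]")
--             skip_next = False
--         elif arg in ["--encryption-passphrase", "-p", "--passphrase"]: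
--             safe_command.append(arg)
--             skip_next = True
--         elif "::" in arg and len(arg.split("::")) == 2:
--             parts = arg.split("::")
--             safe_command.append(f"{parts[0]}::[ARCHIVE]")
--         else:
--             safe_command.append(arg)
--
--     return " ".join(safe_command)
-- ===== SOURCE B (Python) =====
-- def format_command_for_logging(command):
--     """Format command for safe logging (hide sensitive info)"""
--     SENSITIVE = {"--encryption-passphrase", "-p", "--passphrase"}
--     out = []
--     i = 0
--     n = len(command)
--     while i < n:
--         arg = command[i]
--         if arg in SENSITIVE:
--             out.append(arg)
--             if i + 1 < n:
--                 out.append("[REDACTED]")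
--             i += 2
--         else:
--             parts = arg.split("::")
--             if "::" in arg and len(parts) == 2:
--                 out.append(parts[0] + "::[ARCHIVE]")
--             else:
--                 out.append(arg)
--             i += 1
--     return " ".join(out)
-- ===== Notes on version B (the rewrite author's own statement) =====
-- stated objective: alternative
-- what changed: Replaces the for-loop state machine that threads a skip_next boolean through the iteration with a while-index loop using explicit two-token lookahead: a sensitive flag consumes two tokens at once (emitting [REDACTED] only if a next token exists).
import Mathlib
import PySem

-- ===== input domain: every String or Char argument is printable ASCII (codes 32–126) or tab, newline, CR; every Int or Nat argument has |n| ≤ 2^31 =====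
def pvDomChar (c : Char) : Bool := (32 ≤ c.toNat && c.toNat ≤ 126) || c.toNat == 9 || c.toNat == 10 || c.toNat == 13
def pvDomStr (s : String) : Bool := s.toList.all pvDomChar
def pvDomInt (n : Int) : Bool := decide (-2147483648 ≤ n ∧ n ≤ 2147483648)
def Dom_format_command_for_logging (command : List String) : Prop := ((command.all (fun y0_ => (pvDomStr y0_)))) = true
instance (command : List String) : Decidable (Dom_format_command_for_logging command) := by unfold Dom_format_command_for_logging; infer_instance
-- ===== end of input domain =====

-- B replaces A's skip_next boolean state machine with a while-index loop using explicit
-- two-token lookahead; same return value on every input.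

-- ===== PORT A =====
-- one step of A's for-loop: state = (safe_command, skip_next)
def pvStepA (s : List String × Bool) (arg : String) : List String × Bool :=
  if s.2 then (s.1 ++ ["[REDACTED]"], false)
  else if arg = "--encryption-passphrase" ∨ arg = "-p" ∨ arg = "--passphrase" then
    (s.1 ++ [arg], true)
  else if PySem.Str.isIn "::" arg = true ∧ ((PySem.Str.split? arg "::").getD []).length = 2 then
    (s.1 ++ [((PySem.Str.split? arg "::").getD []).headD "" ++ "::[ARCHIVE]"], false)
  else (s.1 ++ [arg], false)

def format_command_for_logging (command : List String) : String :=
  PySem.Str.join " " (command.foldl pvStepA ([], false)).1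

-- ===== PORT B =====
-- the while-loop body of Source B: consumes one token, or two after a sensitive flag
def pvGoB : List String → List String
  | [] => []
  | a :: rest =>
    if a = "--encryption-passphrase" ∨ a = "-p" ∨ a = "--passphrase" then
      match rest with
      | [] => [a]
      | _ :: rest' => a :: "[REDACTED]" :: pvGoB rest'
    else
      (if PySem.Str.isIn "::" a = true ∧ ((PySem.Str.split? a "::").getD []).length = 2 then
        ((PySem.Str.split? a "::").getD []).headD "" ++ "::[ARCHIVE]"
      else a) :: pvGoB rest

def format_command_for_logging_alt (command : List String) : String :=
  PySem.Str.join " " (pvGoB command)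

-- ===== PRECONDITION & SPEC =====
def Spec_format_command_for_logging (command : List String) (out : String) : Prop := out = format_command_for_logging_alt command
instance (command : List String) (out : String) : Decidable (Spec_format_command_for_logging command out) := by unfold Spec_format_command_for_logging; infer_instance

-- ===== CLAIM (what is proved, stated in full; the proofs are below) =====
def Claim_equal_format_command_for_logging : Prop := ∀ (command : List String), Dom_format_command_for_logging command → Spec_format_command_for_logging command (format_command_for_logging command)

-- ===== LEMMAS AND PROOFS =====

-- A's fold from a non-skipping state appends exactly B's output.
lemma pvFold_eq (l : List String) : ∀ acc : List String,
    (l.foldl pvStepA (acc, false)).1 = acc ++ pvGoB l := by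
  induction l using pvGoB.induct with
  | case1 => simp [pvGoB]
  | case2 a h =>
      intro acc
      simp [List.foldl, pvStepA, h, pvGoB]
  | case3 a h b rest' ih =>
      intro acc
      simp only [List.foldl, pvStepA, if_pos h, pvGoB]
      simp [ih]
  | case4 a rest h ih =>
      intro acc
      rw [List.foldl_cons]
      have hstep : pvStepA (acc, false) a =
          (acc ++ [if PySem.Str.isIn "::" a = true ∧ ((PySem.Str.split? a "::").getD []).length = 2 then
              ((PySem.Str.split? a "::").getD []).headD "" ++ "::[ARCHIVE]" else a], false) := by
        unfold pvStepA
        rw [if_neg (by simp), if_neg h]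
        split <;> rfl
      rw [hstep, ih]
      conv_rhs => rw [pvGoB.eq_def]
      simp [h]

-- ===== VERDICT (by name: the statement is the Claim_ definition above) =====
theorem format_command_for_logging_spec : Claim_equal_format_command_for_logging := by
  intro command _
  show _ = _
  simp [format_command_for_logging, format_command_for_logging_alt, pvFold_eq]
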